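-- pv_equiv track=rewrite | github.com/Lamagraph/QTreeVine | collect_logs.py | parse_folder_name
-- ===== SOURCE A (Python) =====
-- ALGO_MAP = {
--     "BFS": "bfs",
--     "SSSP": "sssp",
--     "TriangleCount": "tc"
-- }
--
-- def parse_folder_name(name):
--     if not name.startswith("logs_"):
--         return None, None
--     rest = name[5:]
--     for algo_key, algo_val in ALGO_MAP.items():
--         if rest.startswith(algo_key + "_"):
--             matrix = rest[len(algo_key)+1:]
--             return algo_val, matrix
--         elif rest == algo_key:
--             return algo_val, ""
--     return None, None
-- ===== SOURCE B (Python) =====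
-- ALGO_MAP = {
--     "BFS": "bfs",
--     "SSSP": "sssp",
--     "TriangleCount": "tc"
-- }
--
-- def parse_folder_name(name):
--     if not name.startswith("logs_"):
--         return None, None
--     parts = name[5:].split("_", 1)
--     algo_val = ALGO_MAP.get(parts[0])
--     if algo_val is None:
--         return None, None
--     return algo_val, parts[1] if len(parts) > 1 else ""
-- ===== Notes on version B (the rewrite author's own statement) =====
-- stated objective: simpler
-- what changed: Replaces the loop over ALGO_MAP keys with prefix tests by a single split('_', 1) of the rest of the name followed by one dictionary lookup of the first piece.
import Mathlib
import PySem

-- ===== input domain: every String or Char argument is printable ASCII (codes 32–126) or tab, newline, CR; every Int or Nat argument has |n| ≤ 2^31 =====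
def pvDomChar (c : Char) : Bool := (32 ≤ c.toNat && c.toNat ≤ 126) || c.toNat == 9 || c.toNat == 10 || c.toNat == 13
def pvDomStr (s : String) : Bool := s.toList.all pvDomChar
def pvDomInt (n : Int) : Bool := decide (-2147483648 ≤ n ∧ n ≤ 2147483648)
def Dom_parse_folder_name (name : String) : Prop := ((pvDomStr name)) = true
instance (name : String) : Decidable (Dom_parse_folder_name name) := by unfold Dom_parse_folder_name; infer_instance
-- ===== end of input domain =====

-- B replaces A's scan over ALGO_MAP keys with prefix tests by split('_', 1) plus one dict lookup (objective: simpler).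

-- ===== PORT A =====
-- ALGO_MAP.items() in insertion order
def pvAlgoItems : List (String × String) := [("BFS", "bfs"), ("SSSP", "sssp"), ("TriangleCount", "tc")]

-- the for-loop over ALGO_MAP.items()
def pvLoopA (rest : String) : List (String × String) → Option String × Option String
  | [] => (none, none)
  | (algo_key, algo_val) :: t =>
    if PySem.Str.startswith rest (algo_key ++ "_") then
      (some algo_val, some (PySem.Str.slice rest (some (PySem.Str.len algo_key + 1)) none))
    else if rest == algo_key then (some algo_val, some "")
    else pvLoopA rest t

def parse_folder_name (name : String) : Option String × Option String :=
  if ¬ PySem.Str.startswith name "logs_" then (none, none)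
  else pvLoopA (PySem.Str.slice name (some 5) none) pvAlgoItems

-- ===== PORT B =====
def pvAlgoMap : PySem.Dict String String := ⟨[("BFS", "bfs"), ("SSSP", "sssp"), ("TriangleCount", "tc")]⟩

def parse_folder_name_alt (name : String) : Option String × Option String :=
  if ¬ PySem.Str.startswith name "logs_" then (none, none)
  else
    match PySem.Str.splitMax? (PySem.Str.slice name (some 5) none) "_" 1 with
    | some (p0 :: ps) =>
      match PySem.Dict.get? pvAlgoMap p0 with
      | none => (none, none)
      | some v => (some v, some (match ps with | p1 :: _ => p1 | [] => ""))
    | _ => (none, none)  -- unreachable: split with nonempty separator returns a nonempty list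

-- ===== PRECONDITION & SPEC =====
def Spec_parse_folder_name (name : String) (out : Option String × Option String) : Prop := out = parse_folder_name_alt name
instance (name : String) (out : Option String × Option String) : Decidable (Spec_parse_folder_name name out) := by unfold Spec_parse_folder_name; infer_instance

-- ===== CLAIM (what is proved, stated in full; the proofs are below) =====
def Claim_equal_parse_folder_name : Prop := ∀ (name : String), Dom_parse_folder_name name → Spec_parse_folder_name name (parse_folder_name name)

-- ===== LEMMAS AND PROOFS =====

-- first-underscore splitter used only by the proofs, to characterise split('_', 1)
def pvSplitFirst : List Char → List Char × Option (List Char)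
  | [] => ([], none)
  | c :: t => if c = '_' then ([], some t) else
      let p := pvSplitFirst t
      (c :: p.1, p.2)

theorem pvSplitFirst_none {l a : List Char} (h : pvSplitFirst l = (a, none)) :
    a = l ∧ '_' ∉ l := by
  induction l generalizing a with
  | nil => simp_all [pvSplitFirst]
  | cons c t ih =>
    by_cases hc : c = '_'
    · simp [pvSplitFirst, hc] at h
    · simp only [pvSplitFirst, if_neg hc, Prod.mk.injEq] at h
      obtain ⟨ha, hr⟩ := h
      obtain ⟨h1, h2⟩ := ih (a := (pvSplitFirst t).1) (by rw [← hr])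
      refine ⟨by rw [← ha, h1], ?_⟩
      simp only [List.mem_cons, not_or]
      exact ⟨fun he => hc he.symm, h2⟩

theorem pvSplitFirst_some {l a b : List Char} (h : pvSplitFirst l = (a, some b)) :
    l = a ++ '_' :: b ∧ '_' ∉ a := by
  induction l generalizing a b with
  | nil => simp [pvSplitFirst] at h
  | cons c t ih =>
    by_cases hc : c = '_'
    · simp [pvSplitFirst, hc] at h
      subst hc
      simp [h.1, h.2]
    · simp only [pvSplitFirst, if_neg hc, Prod.mk.injEq] at h
      obtain ⟨ha, hr⟩ := h
      obtain ⟨h1, h2⟩ := ih (a := (pvSplitFirst t).1) (b := b) (by rw [← hr])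
      constructor
      · rw [← ha]
        conv_lhs => rw [h1]
        simp
      rw [← ha]
      simp only [List.mem_cons, not_or]
      exact ⟨fun he => hc he.symm, h2⟩

theorem pvGo_zero (sep : List Char) (fuel : Nat) (l cur : List Char) (acc : List (List Char)) :
    PySem.Chars.splitOnMax.go sep fuel 0 l cur acc = ((cur.reverse ++ l) :: acc).reverse := by
  cases fuel with
  | zero => rfl
  | succ f =>
    cases l with
    | nil => simp [PySem.Chars.splitOnMax.go]
    | cons c t => simp [PySem.Chars.splitOnMax.go]

theorem pvGo_one (l : List Char) (fuel : Nat) (cur : List Char) (acc : List (List Char))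
    (hf : l.length ≤ fuel) :
    PySem.Chars.splitOnMax.go ['_'] fuel 1 l cur acc =
      match pvSplitFirst l with
      | (a, none) => ((cur.reverse ++ a) :: acc).reverse
      | (a, some b) => acc.reverse ++ [cur.reverse ++ a, b] := by
  induction l generalizing fuel cur acc with
  | nil =>
    cases fuel with
    | zero => simp [pvSplitFirst, PySem.Chars.splitOnMax.go]
    | succ f => simp [pvSplitFirst, PySem.Chars.splitOnMax.go]
  | cons c t ih =>
    cases fuel with
    | zero => simp at hf
    | succ f =>
      by_cases hc : c = '_'
      · subst hc
        simp [pvSplitFirst, PySem.Chars.splitOnMax.go, List.isPrefixOf, pvGo_zero]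
      · have hp : (['_'] : List Char).isPrefixOf (c :: t) = false := by
          simp [List.isPrefixOf]
          exact fun he => hc he.symm
        have ht : t.length ≤ f := by simpa using hf
        rw [show PySem.Chars.splitOnMax.go ['_'] (f+1) 1 (c :: t) cur acc =
              PySem.Chars.splitOnMax.go ['_'] f 1 t (c :: cur) acc by
            simp [PySem.Chars.splitOnMax.go, hp]]
        rw [ih f (c :: cur) acc ht]
        rcases hsp : pvSplitFirst t with ⟨a, r⟩
        cases r with
        | none => simp [pvSplitFirst, hc, hsp]
        | some b => simp [pvSplitFirst, hc, hsp]

theorem pvSplit_char (l : List Char) :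
    PySem.Chars.splitOnMax l ['_'] 1 =
      match pvSplitFirst l with
      | (a, none) => [a]
      | (a, some b) => [a, b] := by
  rw [show PySem.Chars.splitOnMax l ['_'] 1 =
        PySem.Chars.splitOnMax.go ['_'] (l.length + 1) 1 l [] [] by rfl]
  rw [pvGo_one l (l.length + 1) [] [] (by omega)]
  rcases hsp : pvSplitFirst l with ⟨a, r⟩
  cases r <;> simp

-- (x ++ "_").isPrefixOf (y ++ "_" ++ b) decides x = y, when neither x nor y contains '_'
theorem pvPrefix_underscore {x y : List Char} (b : List Char)
    (hx : '_' ∉ x) (hy : '_' ∉ y) :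
    (x ++ ['_']).isPrefixOf (y ++ '_' :: b) = true ↔ x = y := by
  induction x generalizing y with
  | nil =>
    cases y with
    | nil => simp [List.isPrefixOf]
    | cons d y' =>
      simp only [List.mem_cons, not_or] at hy
      simp [List.isPrefixOf]
      exact fun he => hy.1 he
  | cons c x' ih =>
    simp only [List.mem_cons, not_or] at hx
    cases y with
    | nil =>
      simp [List.isPrefixOf]
      exact fun he => (hx.1 he.symm).elim
    | cons d y' =>
      simp only [List.mem_cons, not_or] at hy
      simp only [List.cons_append, List.isPrefixOf, Bool.and_eq_true, beq_iff_eq, List.cons.injEq]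
      rw [ih hx.2 hy.2]

theorem pvPrefix_no_underscore {x l : List Char} (hl : '_' ∉ l) :
    (x ++ ['_']).isPrefixOf l = false := by
  induction x generalizing l with
  | nil =>
    cases l with
    | nil => rfl
    | cons c t =>
      simp only [List.mem_cons, not_or] at hl
      simp [List.isPrefixOf]
      exact fun he => hl.1 he
  | cons c x' ih =>
    cases l with
    | nil => rfl
    | cons d t =>
      simp only [List.mem_cons, not_or] at hl
      simp only [List.cons_append, List.isPrefixOf, Bool.and_eq_false_iff]
      right
      exact ih hl.2

theorem pvToList_underscore : ("_" : String).toList = ['_'] := by decide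

-- A's loop when the rest contains no underscore: it degenerates to an association lookup of rest itself
theorem pvLoopA_none (rest : String) (items : List (String × String))
    (hk : ∀ kv ∈ items, '_' ∉ kv.1.toList) (hl : '_' ∉ rest.toList) :
    pvLoopA rest items =
      match List.find? (fun p => p.1 == rest) items with
      | some kv => (some kv.2, some "")
      | none => (none, none) := by
  induction items with
  | nil => simp [pvLoopA]
  | cons kv t ih =>
    obtain ⟨k, v⟩ := kv
    have hk0 : '_' ∉ k.toList := hk (k, v) (by simp)
    have hkt : ∀ kv ∈ t, '_' ∉ kv.1.toList := fun kv h => hk kv (by simp [h])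
    have hsw : (k.toList ++ ['_']).isPrefixOf rest.toList = false :=
      pvPrefix_no_underscore hl
    by_cases hke : rest = k
    · have h1 : (rest == k) = true := by simp [hke]
      have h2 : (k == rest) = true := by simp [hke]
      have hf : List.find? (fun p => p.1 == rest) ((k, v) :: t) = some (k, v) :=
        List.find?_cons_of_pos (by simpa using h2)
      simp [pvLoopA, PySem.Str.startswith, PySem.Chars.startswith, String.toList_append,
        pvToList_underscore, hsw, h1, hf]
    · have hke' : k ≠ rest := fun h => hke h.symm
      have h1 : (rest == k) = false := by simp [hke]
      have h2 : (k == rest) = false := by simp [hke']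
      have hf : List.find? (fun p => p.1 == rest) ((k, v) :: t) =
          List.find? (fun p => p.1 == rest) t :=
        List.find?_cons_of_neg (by simpa using h2)
      simp only [pvLoopA, PySem.Str.startswith, PySem.Chars.startswith, String.toList_append,
        pvToList_underscore, hsw, Bool.false_eq_true, if_false, h1, hf]
      exact ih hkt

-- A's loop when rest = a ++ "_" ++ b with no underscore in a: a lookup of a, matrix b
theorem pvLoopA_some (rest : String) (a b : List Char) (items : List (String × String))
    (hk : ∀ kv ∈ items, '_' ∉ kv.1.toList)
    (hl : rest.toList = a ++ '_' :: b) (ha : '_' ∉ a) :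
    pvLoopA rest items =
      match List.find? (fun p => p.1 == String.ofList a) items with
      | some kv => (some kv.2, some (String.ofList b))
      | none => (none, none) := by
  induction items with
  | nil => simp [pvLoopA]
  | cons kv t ih =>
    obtain ⟨k, v⟩ := kv
    have hk0 : '_' ∉ k.toList := hk (k, v) (by simp)
    have hkt : ∀ kv ∈ t, '_' ∉ kv.1.toList := fun kv h => hk kv (by simp [h])
    by_cases hka : k.toList = a
    · have h1 : (k.toList ++ ['_']).isPrefixOf rest.toList = true := by
        rw [hl, pvPrefix_underscore b hk0 ha]; exact hka
      have h2 : (k == String.ofList a) = true := by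
        have : k = String.ofList a := by
          rw [← String.toList_inj]; simp [hka]
        simp [this]
      have h3 : PySem.Str.slice rest (some ((k.length : Int) + 1)) none = String.ofList b := by
        rw [← String.toList_inj]
        have hnn : (0 : Int) ≤ (k.length : Int) + 1 := by omega
        simp only [PySem.Str.slice, PySem.Chars.slice]
        rw [PySem.List.slice_from rest.toList hnn]
        have hkl : k.length = a.length := by rw [← hka]; simp
        have hto : ((k.length : Int) + 1).toNat = a.length + 1 := by omega
        rw [hto, hl]
        have : a ++ '_' :: b = (a ++ ['_']) ++ b := by simp
        rw [this]
        have hlen : a.length + 1 = (a ++ ['_']).length := by simp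
        rw [hlen, List.drop_left]
      have hf : List.find? (fun p => p.1 == String.ofList a) ((k, v) :: t) = some (k, v) :=
        List.find?_cons_of_pos (by simpa using h2)
      simp [pvLoopA, PySem.Str.startswith, PySem.Chars.startswith, String.toList_append,
        pvToList_underscore, h1, hf, h3]
    · have h1 : (k.toList ++ ['_']).isPrefixOf rest.toList = false := by
        rw [hl]
        exact Bool.eq_false_iff.mpr (fun ht => hka ((pvPrefix_underscore b hk0 ha).mp ht))
      have h2 : (rest == k) = false := by
        have : rest ≠ k := by
          intro he
          apply hk0
          rw [← he, hl]
          simp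
        simp [this]
      have h3 : (k == String.ofList a) = false := by
        have : k ≠ String.ofList a := by
          intro he
          apply hka
          rw [he]; simp
        simp [this]
      have hf : List.find? (fun p => p.1 == String.ofList a) ((k, v) :: t) =
          List.find? (fun p => p.1 == String.ofList a) t :=
        List.find?_cons_of_neg (by simpa using h3)
      simp only [pvLoopA, PySem.Str.startswith, PySem.Chars.startswith, String.toList_append,
        pvToList_underscore, h1, Bool.false_eq_true, if_false, h2, hf]
      exact ih hkt

theorem pvKeys_no_underscore : ∀ kv ∈ pvAlgoItems, '_' ∉ kv.1.toList := by decide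

-- ===== VERDICT (by name: the statement is the Claim_ definition above) =====
theorem parse_folder_name_spec : Claim_equal_parse_folder_name := by
  intro name _
  unfold Spec_parse_folder_name parse_folder_name parse_folder_name_alt
  by_cases hs : PySem.Str.startswith name "logs_"
  · simp only [hs, not_true_eq_false, if_false]
    generalize PySem.Str.slice name (some 5) none = rest
    have hmap := PySem.Str.splitMax?_map rest "_" 1
    rw [pvToList_underscore] at hmap
    simp only [PySem.Chars.splitMax?, List.isEmpty_cons] at hmap
    rw [pvSplit_char rest.toList] at hmap
    rcases hsp : pvSplitFirst rest.toList with ⟨a, r⟩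
    rw [hsp] at hmap
    cases r with
    | none =>
      obtain ⟨haL, hnu⟩ := pvSplitFirst_none hsp
      cases hq : PySem.Str.splitMax? rest "_" 1 with
      | none => rw [hq] at hmap; simp at hmap
      | some parts =>
        rw [hq] at hmap
        simp only [Option.map_some] at hmap
        obtain ⟨p0, hpnil, hp0a⟩ : ∃ p0, parts = [p0] ∧ p0.toList = a := by
          cases parts with
          | nil => simp at hmap
          | cons p0 ps =>
            cases ps with
            | nil => simp at hmap; exact ⟨p0, rfl, hmap⟩
            | cons q qs => simp at hmap
        subst hpnil
        have hp0 : p0 = rest := by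
          rw [← String.toList_inj, hp0a, haL]
        rw [pvLoopA_none rest pvAlgoItems pvKeys_no_underscore (haL ▸ hnu)]
        rw [hp0]
        cases hf : List.find? (fun p => p.1 == rest) pvAlgoItems with
        | none =>
          simp only [PySem.Dict.get?, show pvAlgoMap.items = pvAlgoItems from rfl, hf,
            Option.map]
        | some kv =>
          simp only [PySem.Dict.get?, show pvAlgoMap.items = pvAlgoItems from rfl, hf,
            Option.map]
    | some b =>
      obtain ⟨haL, hnu⟩ := pvSplitFirst_some hsp
      cases hq : PySem.Str.splitMax? rest "_" 1 with
      | none => rw [hq] at hmap; simp at hmap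
      | some parts =>
        rw [hq] at hmap
        simp only [Option.map_some] at hmap
        obtain ⟨p0, p1, hpe, hp0a, hp1b⟩ :
            ∃ p0 p1, parts = [p0, p1] ∧ p0.toList = a ∧ p1.toList = b := by
          cases parts with
          | nil => simp at hmap
          | cons p0 ps =>
            cases ps with
            | nil => simp at hmap
            | cons p1 qs =>
              cases qs with
              | nil =>
                simp at hmap
                exact ⟨p0, p1, rfl, hmap.1, hmap.2⟩
              | cons w ws => simp at hmap
        subst hpe
        have hp0 : p0 = String.ofList a := by
          rw [← String.toList_inj, hp0a]; simp
        have hp1 : p1 = String.ofList b := by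
          rw [← String.toList_inj, hp1b]; simp
        rw [pvLoopA_some rest a b pvAlgoItems pvKeys_no_underscore haL hnu]
        rw [hp0, hp1]
        cases hf : List.find? (fun p => p.1 == String.ofList a) pvAlgoItems with
        | none =>
          simp only [PySem.Dict.get?, show pvAlgoMap.items = pvAlgoItems from rfl, hf,
            Option.map]
        | some kv =>
          simp only [PySem.Dict.get?, show pvAlgoMap.items = pvAlgoItems from rfl, hf,
            Option.map]
  · simp only [Bool.not_eq_true, PySem.Str.startswith] at hs
    rw [show (("logs_" : String).toList) = ['l', 'o', 'g', 's', '_'] from rfl] at hs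
    simp [hs]
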